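-- pv_equiv track=rewrite | github.com/Jordan-Sun/simulated-chem | complex_assignment.py | coarsen
-- ===== SOURCE A (Python) =====
-- import math
--
-- def reshape_to_2d(matrix_3d):
--     height, width, interval = len(matrix_3d), len(matrix_3d[0]), len(matrix_3d[0][0])
--     matrix_2d = [matrix_3d[i//width][i%width] for i in range(height*width)]
--     return matrix_2d
--
-- def coarsen(matrix_2d, width, height, interval,coarse_constant):
--     # Calculate the coarsened dimensions
--     coarse_width = math.ceil(width/coarse_constant)
--     coarse_height = math.ceil(height/coarse_constant)
--     coarse_matrix = [[[0]*interval for _ in range(coarse_height)] for _ in range(coarse_width)]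
--     new_dictionary = {}
--     for i in range(coarse_width):
--         for j in range(coarse_height):
--             tuple_key = (i,j)
--             index = whtoi(i, j, coarse_width, coarse_height)
--             new_dictionary[index] = []
--
--     for y in range(height):
--         j = math.floor(y/coarse_constant)
--         for x in range(width):
--             i = math.floor(x/coarse_constant)
--             tuple_value = whtoi(x, y, width, height)
--             new_dictionary[whtoi(i, j, coarse_width, coarse_height)].append(tuple_value)
--             for k in range(interval):
--                 coarse_matrix[i][j][k] += matrix_2d[whtoi(x, y, width, height)][k]
--     # Convert coarsened 3D matrix back to 2D
--     coarse_matrix_2d = reshape_to_2d(coarse_matrix)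
--     return coarse_matrix_2d, coarse_width, coarse_height, new_dictionary
--
-- def whtoi(x: int, y: int, width: int, height: int) -> int:
--     if x < 0:
--         x += width
--     if x >= width:
--         x -= width
--     if y < 0:
--         y += height
--     if y >= height:
--         y -= height
--     return y * width + x
-- ===== SOURCE B (Python) =====
-- def coarsen(matrix_2d, width, height, interval, coarse_constant):
--     cc = coarse_constant
--     if width <= 0 or height <= 0 or cc <= 0:
--         raise ValueError("width, height and coarse_constant must be positive")
--     coarse_width = -(-width // cc)
--     coarse_height = -(-height // cc)
--     coarse_matrix_2d = []
--     new_dictionary = {}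
--     for i in range(coarse_width):
--         x_lo, x_hi = i * cc, min((i + 1) * cc, width)
--         for j in range(coarse_height):
--             members = []
--             for y in range(j * cc, min((j + 1) * cc, height)):
--                 base = y * width
--                 for x in range(x_lo, x_hi):
--                     members.append(base + x)
--             cell = [sum(matrix_2d[m][k] for m in members) for k in range(interval)]
--             new_dictionary[j * coarse_width + i] = members
--             coarse_matrix_2d.append(cell)
--     return coarse_matrix_2d, coarse_width, coarse_height, new_dictionary
-- ===== Notes on version B (the rewrite author's own statement) =====
-- stated objective: alternative
-- what changed: Output-driven gather: instead of scattering every fine pixel into a preallocated 3D coarse matrix and a pre-initialised dictionary and reshaping at the end, B loops over coarse cells, enumerates each cell's source block with integer range bounds, sums the block directly into the output row and builds the dictionary entry in one go; B validates that width, height and coarse_constant are positive.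
-- outside the precondition, e.g. on coarsen([], -2, -2, 0, -2): A returns ([[]], 1, 1, {0: []}), B raises ValueError; on coarsen([], -1, -1, 3, -2): A returns ([[0, 0, 0]], 1, 1, {0: []}), B raises ValueError
import Mathlib
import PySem

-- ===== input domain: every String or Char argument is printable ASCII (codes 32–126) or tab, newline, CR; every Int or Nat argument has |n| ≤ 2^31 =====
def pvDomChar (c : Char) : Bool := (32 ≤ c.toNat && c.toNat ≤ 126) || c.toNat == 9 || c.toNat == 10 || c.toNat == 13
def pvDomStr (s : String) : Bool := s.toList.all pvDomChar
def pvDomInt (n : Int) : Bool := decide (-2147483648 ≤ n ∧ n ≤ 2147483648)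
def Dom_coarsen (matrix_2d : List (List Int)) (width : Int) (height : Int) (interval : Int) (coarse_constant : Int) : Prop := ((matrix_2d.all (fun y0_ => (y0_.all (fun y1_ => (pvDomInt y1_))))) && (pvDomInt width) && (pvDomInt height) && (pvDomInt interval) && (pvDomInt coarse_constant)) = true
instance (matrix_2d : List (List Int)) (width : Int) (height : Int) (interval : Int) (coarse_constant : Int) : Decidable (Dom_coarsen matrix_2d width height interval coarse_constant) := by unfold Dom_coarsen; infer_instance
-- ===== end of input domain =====

-- B re-implements the block downsampling as an output-driven gather over coarse cells (same values, dict order and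
-- tuple; alternative decomposition, not claimed faster). Python A mutates nothing observable; return values only.

-- ===== PORT A =====
-- math.ceil(a/b) on int arguments: exact integer ceiling division -((-a)//b) (floats are exact at the
-- magnitudes Pre_ admits, |a| ≤ 2^31 < 2^53)
def pvCeilA (a b : Int) : Int := -(PySem.Int.floordiv (-a) b)

def whtoi (x : Int) (y : Int) (width : Int) (height : Int) : Int :=
  let x1 := if x < 0 then x + width else x
  let x2 := if x1 ≥ width then x1 - width else x1
  let y1 := if y < 0 then y + height else y
  let y2 := if y1 ≥ height then y1 - height else y1
  y2 * width + x2

def reshape_to_2d (matrix_3d : List (List (List Int))) : List (List Int) :=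
  -- len(matrix_3d[0]) / matrix_3d[0][0] raise IndexError on empty input; `.getD []` marks the spot, Pre_ excludes it
  let height : Int := matrix_3d.length
  let width : Int := ((PySem.List.pyGet? matrix_3d 0).getD []).length
  (PySem.List.pyRange 0 (height * width) 1).map (fun i =>
    (PySem.List.pyGet? ((PySem.List.pyGet? matrix_3d (PySem.Int.floordiv i width)).getD [])
      (PySem.Int.mod i width)).getD [])

def coarsen (matrix_2d : List (List Int)) (width : Int) (height : Int) (interval : Int) (coarse_constant : Int) : List (List Int) × Int × Int × (List (Int × List Int)) :=
  let coarse_width := pvCeilA width coarse_constant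
  let coarse_height := pvCeilA height coarse_constant
  let coarse_matrix : List (List (List Int)) :=
    (PySem.List.pyRange 0 coarse_width 1).map (fun _ =>
      (PySem.List.pyRange 0 coarse_height 1).map (fun _ => PySem.List.pyRepeat [(0 : Int)] interval))
  let dict0 : PySem.Dict Int (List Int) :=
    (PySem.List.pyRange 0 coarse_width 1).foldl (fun d i =>
      (PySem.List.pyRange 0 coarse_height 1).foldl (fun d j =>
        d.insert (whtoi i j coarse_width coarse_height) []) d) PySem.Dict.empty
  let st :=
    (PySem.List.pyRange 0 height 1).foldl (fun st y =>
      let j := PySem.Int.floordiv y coarse_constant   -- math.floor(y/cc): exact on the admitted magnitudes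
      (PySem.List.pyRange 0 width 1).foldl (fun st x =>
        let i := PySem.Int.floordiv x coarse_constant
        let tv := whtoi x y width height
        ((PySem.List.pyRange 0 interval 1).foldl (fun cm k =>
            cm.modify i.toNat (fun col => col.modify j.toNat (fun cell =>
              cell.modify k.toNat (fun v =>
                v + (PySem.List.pyGet? ((PySem.List.pyGet? matrix_2d (whtoi x y width height)).getD []) k).getD 0)))) st.1,
         st.2.modify (whtoi i j coarse_width coarse_height) [] (fun l => l ++ [tv]))) st)
      (coarse_matrix, dict0)
  (reshape_to_2d st.1, coarse_width, coarse_height, st.2.items)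

-- ===== PORT B =====
def coarsen_alt (matrix_2d : List (List Int)) (width : Int) (height : Int) (interval : Int) (coarse_constant : Int) : List (List Int) × Int × Int × (List (Int × List Int)) :=
  let cc := coarse_constant
  let coarse_width := -(PySem.Int.floordiv (-width) cc)
  let coarse_height := -(PySem.Int.floordiv (-height) cc)
  let res :=
    (PySem.List.pyRange 0 coarse_width 1).foldl (fun res i =>
      let xlo := i * cc
      let xhi := min ((i + 1) * cc) width
      (PySem.List.pyRange 0 coarse_height 1).foldl (fun res j =>
        let members :=
          (PySem.List.pyRange (j * cc) (min ((j + 1) * cc) height) 1).foldl (fun ms y =>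
            (PySem.List.pyRange xlo xhi 1).foldl (fun ms x => ms ++ [y * width + x]) ms) []
        let cell :=
          (PySem.List.pyRange 0 interval 1).map (fun k =>
            (members.map (fun m =>
              (PySem.List.pyGet? ((PySem.List.pyGet? matrix_2d m).getD []) k).getD 0)).sum)
        (res.1 ++ [cell], res.2.insert (j * coarse_width + i) members)) res)
      (([] : List (List Int)), (PySem.Dict.empty : PySem.Dict Int (List Int)))
  (res.1, coarse_width, coarse_height, res.2.items)

-- ===== PRECONDITION & SPEC =====
-- Pre_ requires width, height, coarse_constant ≥ 1 and, when interval > 0, width*height rows of length ≥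
-- interval (A raises IndexError/ZeroDivisionError/KeyError on almost all other inputs); it also excludes the
-- degenerate non-positive width/height/coarse_constant corners where A happens to return an accidental value
-- (e.g. a 1x1 zero block when the y-loop never runs) — B raises ValueError there.
def Pre_coarsen (matrix_2d : List (List Int)) (width : Int) (height : Int) (interval : Int) (coarse_constant : Int) : Prop :=
  1 ≤ width ∧ 1 ≤ height ∧ 1 ≤ coarse_constant ∧
  (0 < interval → (width * height ≤ (matrix_2d.length : Int) ∧
    ∀ row ∈ matrix_2d.take (width * height).toNat, interval ≤ (row.length : Int)))
instance (matrix_2d : List (List Int)) (width : Int) (height : Int) (interval : Int) (coarse_constant : Int) : Decidable (Pre_coarsen matrix_2d width height interval coarse_constant) := by unfold Pre_coarsen; infer_instance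

def pvWitness_coarsen : List (List Int) × Int × Int × Int × Int := ([[1, 2], [3, 4], [5, 6], [7, 8]], 2, 2, 2, 2)

def Spec_coarsen (matrix_2d : List (List Int)) (width : Int) (height : Int) (interval : Int) (coarse_constant : Int) (out : List (List Int) × Int × Int × (List (Int × List Int))) : Prop := out = coarsen_alt matrix_2d width height interval coarse_constant
instance (matrix_2d : List (List Int)) (width : Int) (height : Int) (interval : Int) (coarse_constant : Int) (out : List (List Int) × Int × Int × (List (Int × List Int))) : Decidable (Spec_coarsen matrix_2d width height interval coarse_constant out) := by unfold Spec_coarsen; infer_instance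

-- ===== CLAIM (what is proved, stated in full; the proofs are below) =====
def Claim_equal_coarsen : Prop := ∀ (matrix_2d : List (List Int)) (width : Int) (height : Int) (interval : Int) (coarse_constant : Int), Dom_coarsen matrix_2d width height interval coarse_constant → Pre_coarsen matrix_2d width height interval coarse_constant → Spec_coarsen matrix_2d width height interval coarse_constant (coarsen matrix_2d width height interval coarse_constant)

-- ===== LEMMAS AND PROOFS =====

-- proof-only helper definitions: the common canonical value both ports are reduced to
def pvPairs (a b : Int) : List (Int × Int) :=
  (PySem.List.pyRange 0 a 1).flatMap (fun p => (PySem.List.pyRange 0 b 1).map (fun q => (p, q)))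

def pvKey (cw : Int) (p : Int × Int) : Int := p.2 * cw + p.1

def pvMembers (w cc h i j : Int) : List Int :=
  (PySem.List.pyRange (j * cc) (min ((j + 1) * cc) h) 1).flatMap (fun y =>
    (PySem.List.pyRange (i * cc) (min ((i + 1) * cc) w) 1).map (fun x => y * w + x))

def pvEntry (m : List (List Int)) (t k : Int) : Int :=
  (PySem.List.pyGet? ((PySem.List.pyGet? m t).getD []) k).getD 0

def pvCellVec (m : List (List Int)) (w cc h iv i j : Int) : List Int :=
  (PySem.List.pyRange 0 iv 1).map (fun k =>
    ((pvMembers w cc h i j).map (fun t => pvEntry m t k)).sum)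

def pvOut (m : List (List Int)) (w h iv cc : Int) : List (List Int) × Int × Int × (List (Int × List Int)) :=
  ((pvPairs (pvCeilA w cc) (pvCeilA h cc)).map (fun p => pvCellVec m w cc h iv p.1 p.2),
   pvCeilA w cc, pvCeilA h cc,
   (pvPairs (pvCeilA w cc) (pvCeilA h cc)).map (fun p => (pvKey (pvCeilA w cc) p, pvMembers w cc h p.1 p.2)))

-- a double counting loop is a loop over the pair list
lemma pvFoldl2 {σ : Type} (G : σ → Int → Int → σ) (a b : Int) (init : σ) :
    (PySem.List.pyRange 0 a 1).foldl
      (fun s p => (PySem.List.pyRange 0 b 1).foldl (fun s q => G s p q) s) init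
    = (pvPairs a b).foldl (fun s p => G s p.1 p.2) init := by
  simp only [pvPairs, List.flatMap_def, List.foldl_flatten, List.foldl_map]

lemma pvMem_pairs {a b : Int} {p : Int × Int} :
    p ∈ pvPairs a b ↔ (0 ≤ p.1 ∧ p.1 < a) ∧ (0 ≤ p.2 ∧ p.2 < b) := by
  obtain ⟨p1, p2⟩ := p
  simp only [pvPairs, List.mem_flatMap, List.mem_map, PySem.List.mem_pyRange_one, Prod.mk.injEq]
  constructor
  · rintro ⟨y, hy, q, hq, rfl, rfl⟩; exact ⟨hy, hq⟩
  · rintro ⟨h1, h2⟩; exact ⟨p1, h1, p2, h2, rfl, rfl⟩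

-- scatter loops: entry u of a fold of modifies is the fold over the updates aimed at u
lemma pvFoldlModifyGet {γ α : Type} (idx : γ → Nat) (f : γ → α → α) :
    ∀ (l : List γ) (cl : List α) (u : Nat),
    (l.foldl (fun acc p => acc.modify (idx p) (f p)) cl)[u]? =
      (cl[u]?).map (fun v => (l.filter (fun p => idx p == u)).foldl (fun v p => f p v) v) := by
  intro l
  induction l with
  | nil => intro cl u; simp
  | cons p l ih =>
    intro cl u
    simp only [List.foldl_cons, List.filter_cons]
    rw [ih]
    by_cases h : idx p = u
    · subst h
      simp only [beq_self_eq_true, if_true]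
      rw [List.getElem?_modify]
      cases hcl : cl[idx p]? <;> simp [List.foldl_cons]
    · have hb : (idx p == u) = false := by simp [h]
      simp only [hb, Bool.false_eq_true, if_false]
      rw [List.getElem?_modify]
      cases hcl : cl[u]? <;> simp [h]

lemma pvFoldlModifyLength {γ α : Type} (idx : γ → Nat) (f : γ → α → α) :
    ∀ (l : List γ) (cl : List α),
    (l.foldl (fun acc p => acc.modify (idx p) (f p)) cl).length = cl.length := by
  intro l
  induction l with
  | nil => intro cl; rfl
  | cons p l ih => intro cl; simp [List.foldl_cons, ih, List.length_modify]

-- the fine indices whose block is q form exactly the block interval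
lemma pvFilterRangeDiv {cc q : Int} (n : Int) (hcc : 0 < cc) (hq : 0 ≤ q) :
    (PySem.List.pyRange 0 n 1).filter (fun t => decide (PySem.Int.floordiv t cc = q))
      = PySem.List.pyRange (q * cc) (min ((q + 1) * cc) n) 1 := by
  have hnn : (0:Int) ≤ q * cc := mul_nonneg hq hcc.le
  apply List.Perm.eq_of_pairwise (le := ((· < ·) : Int → Int → Prop))
  · exact fun a b _ _ hab hba => absurd hba (lt_asymm hab)
  · exact List.Pairwise.filter _ (PySem.List.pairwise_lt_pyRange_one 0 n)
  · exact PySem.List.pairwise_lt_pyRange_one _ _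
  · refine (List.perm_ext_iff_of_nodup (List.Nodup.filter _ (PySem.List.nodup_pyRange_one 0 n))
      (PySem.List.nodup_pyRange_one _ _)).mpr ?_
    intro x
    simp only [List.mem_filter, PySem.List.mem_pyRange_one, decide_eq_true_eq,
      PySem.Int.floordiv_eq_iff_of_pos hcc]
    omega

lemma pvFilterRangeEq (iv : Int) (t : Nat) :
    (PySem.List.pyRange 0 iv 1).filter (fun k => k.toNat == t)
      = if (t : Int) < iv then [(t : Int)] else [] := by
  apply List.Perm.eq_of_pairwise (le := ((· < ·) : Int → Int → Prop))
  · exact fun a b _ _ hab hba => absurd hba (lt_asymm hab)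
  · exact List.Pairwise.filter _ (PySem.List.pairwise_lt_pyRange_one 0 iv)
  · split_ifs <;> simp
  · have hnd2 : (if (t : Int) < iv then [(t : Int)] else []).Nodup := by split_ifs <;> simp
    refine (List.perm_ext_iff_of_nodup (List.Nodup.filter _ (PySem.List.nodup_pyRange_one 0 iv))
      hnd2).mpr ?_
    intro x
    simp only [List.mem_filter, PySem.List.mem_pyRange_one, beq_iff_eq]
    split_ifs with ht <;> simp <;> omega

lemma pvKeyInj {cw i1 j1 i2 j2 : Int} (h1 : 0 ≤ i1) (h2 : i1 < cw) (h3 : 0 ≤ i2) (h4 : i2 < cw) :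
    j1 * cw + i1 = j2 * cw + i2 ↔ (i1 = i2 ∧ j1 = j2) := by
  constructor
  · intro e
    rcases lt_trichotomy j1 j2 with hj | hj | hj
    · exfalso
      nlinarith [mul_le_mul_of_nonneg_right (show j1 + 1 ≤ j2 by omega) (show (0:Int) ≤ cw by omega)]
    · subst hj; constructor <;> nlinarith
    · exfalso
      nlinarith [mul_le_mul_of_nonneg_right (show j2 + 1 ≤ j1 by omega) (show (0:Int) ≤ cw by omega)]
  · rintro ⟨rfl, rfl⟩; rfl

lemma pvNodupKeys (cw ch : Int) : ((pvPairs cw ch).map (pvKey cw)).Nodup := by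
  by_cases hcw : cw ≤ 0
  · simp [pvPairs, PySem.List.pyRange_one_eq_nil hcw]
  · have hcw : 0 < cw := by omega
    apply List.Nodup.map_on
    · intro p hp q hq e
      rw [pvMem_pairs] at hp hq
      have := (pvKeyInj hp.1.1 hp.1.2 hq.1.1 hq.1.2).mp e
      exact Prod.ext this.1 this.2
    · rw [pvPairs, List.nodup_flatMap]
      constructor
      · intro x _
        exact (PySem.List.nodup_pyRange_one 0 ch).map
          (fun a b hab => (Prod.mk.injEq _ _ _ _ ▸ hab : _ ∧ _).2)
      · refine List.Pairwise.imp ?_ (PySem.List.pairwise_lt_pyRange_one 0 cw)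
        intro a b hab z hza hzb
        simp only [List.mem_map] at hza hzb
        obtain ⟨q1, _, rfl⟩ := hza
        obtain ⟨q2, _, e⟩ := hzb
        exact absurd (congrArg Prod.fst e) (by simpa using (ne_of_lt hab).symm)

lemma pvSetUpdate_self (s : List Int) :
    ∀ (l : List Int), (∀ x ∈ l, x ∈ s) → PySem.Set.update s l = s := by
  intro l
  induction l generalizing s with
  | nil => intro _; rfl
  | cons x l ih =>
    intro hmem
    have hx : PySem.Set.add s x = s := by
      unfold PySem.Set.add; simp [hmem x (by simp)]
    show PySem.Set.update s (x :: l) = s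
    unfold PySem.Set.update
    rw [List.foldl_cons, hx]
    exact ih s (fun z hz => hmem z (by simp [hz]))

lemma pvWhtoi_eq {x y w h : Int} (hx0 : 0 ≤ x) (hx : x < w) (hy0 : 0 ≤ y) (hy : y < h) :
    whtoi x y w h = y * w + x := by
  simp only [whtoi]
  rw [if_neg (by omega), if_neg (by omega), if_neg (by omega), if_neg (by omega)]

lemma pvCeil_bounds {w cc : Int} (hcc : 0 < cc) :
    (pvCeilA w cc - 1) * cc < w ∧ w ≤ pvCeilA w cc * cc :=
  (PySem.Int.neg_floordiv_neg_eq_iff_of_pos hcc).mp rfl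

lemma pvCeil_pos {w cc : Int} (hw : 1 ≤ w) (hcc : 0 < cc) : 1 ≤ pvCeilA w cc := by
  have hb := (pvCeil_bounds (w := w) hcc).2
  nlinarith

lemma pvDiv_bounds {x w cc : Int} (hcc : 0 < cc) (hx0 : 0 ≤ x) (hx : x < w) :
    0 ≤ PySem.Int.floordiv x cc ∧ PySem.Int.floordiv x cc < pvCeilA w cc := by
  constructor
  · rw [PySem.Int.floordiv_eq_ediv_of_pos hcc]
    exact Int.ediv_nonneg hx0 hcc.le
  · rw [PySem.Int.floordiv_lt_iff_lt_mul hcc]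
    exact lt_of_lt_of_le hx (pvCeil_bounds hcc).2

lemma pvFlatMapIf {α β : Type} (P : α → Prop) [DecidablePred P] (g : α → List β) :
    ∀ l : List α,
    (l.flatMap (fun y => if P y then g y else [])) = (l.filter (fun y => decide (P y))).flatMap g := by
  intro l
  induction l with
  | nil => rfl
  | cons y l ih =>
    simp only [List.flatMap_cons, List.filter_cons]
    by_cases h : P y
    · simp [h, ih]
    · simp [h, ih]

-- the fine pixels whose block is (i, j), in scan order, are exactly the block's gather list
lemma pvGridFilter {w h cc i j : Int} (hcc : 0 < cc) (hi : 0 ≤ i) (hj : 0 ≤ j) :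
    ((pvPairs h w).filter (fun p =>
        decide (PySem.Int.floordiv p.1 cc = j) && decide (PySem.Int.floordiv p.2 cc = i))).map
      (fun p => p.1 * w + p.2)
      = pvMembers w cc h i j := by
  have step : ∀ y : Int,
      ((List.filter (fun p : Int × Int =>
          decide (PySem.Int.floordiv p.1 cc = j) && decide (PySem.Int.floordiv p.2 cc = i))
        (List.map (fun q => (y, q)) (PySem.List.pyRange 0 w 1))).map (fun p => p.1 * w + p.2))
      = if PySem.Int.floordiv y cc = j then
          (PySem.List.pyRange (i * cc) (min ((i + 1) * cc) w) 1).map (fun x => y * w + x)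
        else [] := by
    intro y
    rw [List.filter_map]
    by_cases hy : PySem.Int.floordiv y cc = j
    · rw [if_pos hy]
      have : ((fun p : Int × Int =>
          decide (PySem.Int.floordiv p.1 cc = j) && decide (PySem.Int.floordiv p.2 cc = i)) ∘
            (fun q => (y, q))) = fun q => decide (PySem.Int.floordiv q cc = i) := by
        funext q; simp [Function.comp, hy]
      rw [this, pvFilterRangeDiv w hcc hi, List.map_map]
      rfl
    · rw [if_neg hy]
      have : ((fun p : Int × Int =>
          decide (PySem.Int.floordiv p.1 cc = j) && decide (PySem.Int.floordiv p.2 cc = i)) ∘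
            (fun q => (y, q))) = fun _ => false := by
        funext q; simp [Function.comp, hy]
      rw [this, List.filter_false]
      rfl
  unfold pvPairs pvMembers
  rw [List.filter_flatMap, List.map_flatMap]
  simp only [step]
  rw [pvFlatMapIf (P := fun y => PySem.Int.floordiv y cc = j), pvFilterRangeDiv h hcc hj]

-- reading a cw*ch row-major table cell by cell
lemma pvRangeMulMap {β : Type} (F : Int → Int → β) (a b : Int) (hb : 0 < b) (ha : 0 ≤ a) :
    (PySem.List.pyRange 0 (a * b) 1).map
        (fun r => F (PySem.Int.floordiv r b) (PySem.Int.mod r b))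
      = (pvPairs a b).map (fun p => F p.1 p.2) := by
  obtain ⟨n, rfl⟩ : ∃ n : Nat, a = (n : Int) := ⟨a.toNat, (Int.toNat_of_nonneg ha).symm⟩
  clear ha
  induction n with
  | zero => simp [pvPairs, PySem.List.pyRange_zero]
  | succ n ih =>
    have h1 : ((n + 1 : Nat) : Int) * b = (n : Int) * b + b := by push_cast; ring
    have h0 : (0 : Int) ≤ (n : Int) * b := by positivity
    rw [h1, PySem.List.pyRange_one_append 0 ((n : Int) * b) ((n : Int) * b + b) h0 (by omega),
      List.map_append, ih]
    have h2 : ((n + 1 : Nat) : Int) = (n : Int) + 1 := by push_cast; ring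
    have hpairs : pvPairs ((n + 1 : Nat) : Int) b
        = pvPairs (n : Int) b ++ (PySem.List.pyRange 0 b 1).map (fun q => ((n : Int), q)) := by
      rw [pvPairs, pvPairs, h2, PySem.List.pyRange_one_succ_right (by positivity),
        List.flatMap_append]
      simp [List.flatMap_cons]
    rw [hpairs, List.map_append]
    congr 1
    rw [PySem.List.pyRange_one ((n : Int) * b) ((n : Int) * b + b),
      PySem.List.pyRange_one 0 b, List.map_map, List.map_map, List.map_map]
    have harg : ((n : Int) * b + b - (n : Int) * b).toNat = (b - 0).toNat := by omega
    rw [harg]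
    apply List.map_congr_left
    intro k hk
    rw [List.mem_range] at hk
    have hkb : (k : Int) < b := by omega
    have hfd : PySem.Int.floordiv ((n : Int) * b + (k : Int)) b = (n : Int) := by
      rw [PySem.Int.floordiv_eq_iff_of_pos hb]
      constructor
      · omega
      · have : ((n : Int) + 1) * b = (n : Int) * b + b := by ring
        omega
    have hmd : PySem.Int.mod ((n : Int) * b + (k : Int)) b = (k : Int) := by
      have hh := PySem.Int.floordiv_mul_add_mod ((n : Int) * b + (k : Int)) b
      rw [hfd] at hh
      omega
    simp only [Function.comp, hfd, hmd, zero_add]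

lemma pvKFold (iv : Int) (e : Int → Int) (cl : List Int) (t : Nat) :
    ((PySem.List.pyRange 0 iv 1).foldl (fun acc k => acc.modify k.toNat (fun v => v + e k)) cl)[t]? =
      (cl[t]?).map (fun v => v + (if (t : Int) < iv then e (t : Int) else 0)) := by
  rw [pvFoldlModifyGet (idx := fun k : Int => k.toNat) (f := fun k v => v + e k)]
  rw [pvFilterRangeEq]
  split_ifs with h <;> cases hcl : cl[t]? <;> simp

lemma pvLFold {γ : Type} (iv : Int) (e : γ → Int → Int) :
    ∀ (L : List γ) (cl : List Int) (t : Nat),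
    (L.foldl (fun acc p =>
        (PySem.List.pyRange 0 iv 1).foldl (fun acc k => acc.modify k.toNat (fun v => v + e p k)) acc) cl)[t]? =
      (cl[t]?).map (fun v => v + (L.map (fun p => if (t : Int) < iv then e p (t : Int) else 0)).sum) := by
  intro L
  induction L with
  | nil => intro cl t; cases hcl : cl[t]? <;> simp [hcl]
  | cons p L ih =>
    intro cl t
    rw [List.foldl_cons, ih, pvKFold]
    cases hcl : cl[t]? <;> simp [add_assoc]

lemma pvModifyModify {α : Type} (l : List α) (u : Nat) (g1 g2 : α → α) :
    (l.modify u g1).modify u g2 = l.modify u (fun a => g2 (g1 a)) := by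
  apply List.ext_getElem?
  intro t
  simp only [List.getElem?_modify]
  cases l[t]? <;> by_cases hu : u = t <;> simp [hu]

lemma pvModifyId {α : Type} (l : List α) (u : Nat) : l.modify u (fun a => a) = l := by
  apply List.ext_getElem?
  intro t
  simp only [List.getElem?_modify]
  cases l[t]? <;> by_cases hu : u = t <;> simp [hu]

-- a loop of modifies aimed at ONE index is a single modify
lemma pvFoldModifySame {κ α : Type} (u : Nat) (g : κ → α → α) :
    ∀ (l : List κ) (cm : List α),
    l.foldl (fun acc k => acc.modify u (g k)) cm
      = cm.modify u (fun a => l.foldl (fun a k => g k a) a)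
  | [], cm => by simpa using (pvModifyId cm u).symm
  | k :: l, cm => by
    rw [List.foldl_cons, pvFoldModifySame u g l, pvModifyModify]
    rfl

lemma pvGetMapRange {β : Type} (f : Int → β) (n : Int) (t : Nat) :
    ((PySem.List.pyRange 0 n 1).map f)[t]? = if (t : Int) < n then some (f (t : Int)) else none := by
  rw [PySem.List.pyRange_one, List.map_map, List.getElem?_map]
  by_cases h1 : t < (n - 0).toNat
  · rw [List.getElem?_range h1, if_pos (by omega)]
    simp only [Option.map_some, Function.comp_apply, zero_add]
  · rw [List.getElem?_eq_none (by simpa using (by omega : (n - 0).toNat ≤ t)), if_neg (by omega)]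
    rfl

-- B reduces to the canonical value
lemma pvB_eq (m : List (List Int)) (w h iv cc : Int) (hw : 1 ≤ w) (hh : 1 ≤ h) (hcc : 1 ≤ cc) :
    coarsen_alt m w h iv cc = pvOut m w h iv cc := by
  have hcw : 1 ≤ pvCeilA w cc := pvCeil_pos hw (by omega)
  have hch : 1 ≤ pvCeilA h cc := pvCeil_pos hh (by omega)
  have hfold : ∀ a b : Int, -PySem.Int.floordiv (-a) b = pvCeilA a b := fun _ _ => rfl
  unfold coarsen_alt
  dsimp only
  simp only [hfold]
  simp only [PySem.List.foldl_append_singleton_eq_map, PySem.List.foldl_append_eq_flatMap,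
    List.nil_append]
  have hmem : ∀ i j : Int,
      (PySem.List.pyRange (j * cc) (min ((j + 1) * cc) h) 1).flatMap (fun y =>
        (PySem.List.pyRange (i * cc) (min ((i + 1) * cc) w) 1).map (fun x => y * w + x))
      = pvMembers w cc h i j := fun _ _ => rfl
  simp only [hmem]
  have hcell : ∀ i j : Int,
      (PySem.List.pyRange 0 iv 1).map (fun k =>
        ((pvMembers w cc h i j).map (fun t =>
          (PySem.List.pyGet? ((PySem.List.pyGet? m t).getD []) k).getD 0)).sum)
      = pvCellVec m w cc h iv i j := fun _ _ => rfl
  simp only [hcell]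
  rw [pvFoldl2 (G := fun (res : List (List Int) × PySem.Dict Int (List Int)) i j =>
    (res.1 ++ [pvCellVec m w cc h iv i j],
     res.2.insert (j * pvCeilA w cc + i) (pvMembers w cc h i j)))]
  rw [PySem.List.foldl_prod_mk
    (f := fun (l : List (List Int)) (p : Int × Int) => l ++ [pvCellVec m w cc h iv p.1 p.2])
    (g := fun (d : PySem.Dict Int (List Int)) (p : Int × Int) =>
      d.insert (p.2 * pvCeilA w cc + p.1) (pvMembers w cc h p.1 p.2))]
  rw [PySem.List.foldl_append_singleton_eq_map, List.nil_append,
    PySem.Dict.items_foldl_insert_fresh (pvPairs (pvCeilA w cc) (pvCeilA h cc))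
      (fun p : Int × Int => p.2 * pvCeilA w cc + p.1) (fun p => pvMembers w cc h p.1 p.2)
      PySem.Dict.empty (fun a _ => by simp) (pvNodupKeys (pvCeilA w cc) (pvCeilA h cc))]
  simp only [pvOut, pvKey]
  rfl

def pvCmStep (m : List (List Int)) (w cc iv : Int) (cm : List (List (List Int))) (p : Int × Int) :
    List (List (List Int)) :=
  (PySem.List.pyRange 0 iv 1).foldl (fun acc k =>
    acc.modify (PySem.Int.floordiv p.2 cc).toNat (fun col =>
      col.modify (PySem.Int.floordiv p.1 cc).toNat (fun cell =>
        cell.modify k.toNat (fun v => v + pvEntry m (p.1 * w + p.2) k)))) cm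

def pvDStep (cw w cc : Int) (d : PySem.Dict Int (List Int)) (p : Int × Int) :
    PySem.Dict Int (List Int) :=
  d.modify ((PySem.Int.floordiv p.1 cc) * cw + PySem.Int.floordiv p.2 cc) []
    (fun l => l ++ [p.1 * w + p.2])

-- A reduces to the canonical value
lemma pvA_eq (m : List (List Int)) (w h iv cc : Int) (hw : 1 ≤ w) (hh : 1 ≤ h) (hcc : 1 ≤ cc) :
    coarsen m w h iv cc = pvOut m w h iv cc := by
  have hccp : (0:Int) < cc := by omega
  have hcwp : 1 ≤ pvCeilA w cc := pvCeil_pos hw hccp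
  have hchp : 1 ≤ pvCeilA h cc := pvCeil_pos hh hccp
  unfold coarsen
  dsimp only
  rw [pvFoldl2, pvFoldl2]
  have hbody : ∀ (st : List (List (List Int)) × PySem.Dict Int (List Int)), ∀ p ∈ pvPairs h w,
      ((PySem.List.pyRange 0 iv 1).foldl
          (fun cm k =>
            cm.modify (PySem.Int.floordiv p.2 cc).toNat fun col =>
              col.modify (PySem.Int.floordiv p.1 cc).toNat fun cell =>
                cell.modify k.toNat fun v =>
                  v + (PySem.List.pyGet? ((PySem.List.pyGet? m (whtoi p.2 p.1 w h)).getD []) k).getD 0)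
          st.1,
        st.2.modify
          (whtoi (PySem.Int.floordiv p.2 cc) (PySem.Int.floordiv p.1 cc) (pvCeilA w cc) (pvCeilA h cc))
          [] fun l => l ++ [whtoi p.2 p.1 w h])
      = (pvCmStep m w cc iv st.1 p, pvDStep (pvCeilA w cc) w cc st.2 p) := by
    intro st p hp
    rw [pvMem_pairs] at hp
    have hx := pvDiv_bounds (w := w) hccp hp.2.1 hp.2.2
    have hy := pvDiv_bounds (w := h) hccp hp.1.1 hp.1.2
    rw [pvWhtoi_eq hp.2.1 hp.2.2 hp.1.1 hp.1.2, pvWhtoi_eq hx.1 hx.2 hy.1 hy.2]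
    rfl
  rw [PySem.List.foldl_congr_mem _ _ _ _ hbody]
  rw [PySem.List.foldl_prod_mk (f := pvCmStep m w cc iv) (g := pvDStep (pvCeilA w cc) w cc)]
  dsimp only
  have hd0 : (pvPairs (pvCeilA w cc) (pvCeilA h cc)).foldl
        (fun s p => s.insert (whtoi p.1 p.2 (pvCeilA w cc) (pvCeilA h cc)) []) PySem.Dict.empty
      = (pvPairs (pvCeilA w cc) (pvCeilA h cc)).foldl
        (fun s p => s.insert (pvKey (pvCeilA w cc) p) ([] : List Int)) PySem.Dict.empty := by
    apply PySem.List.foldl_congr_mem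
    intro d p hp
    rw [pvMem_pairs] at hp
    rw [pvWhtoi_eq hp.1.1 hp.1.2 hp.2.1 hp.2.2]
    rfl
  rw [hd0]
  have hdict : ((pvPairs h w).foldl (pvDStep (pvCeilA w cc) w cc)
        ((pvPairs (pvCeilA w cc) (pvCeilA h cc)).foldl
          (fun s p => s.insert (pvKey (pvCeilA w cc) p) ([] : List Int)) PySem.Dict.empty)).items
      = (pvPairs (pvCeilA w cc) (pvCeilA h cc)).map
          (fun p => (pvKey (pvCeilA w cc) p, pvMembers w cc h p.1 p.2)) := by
    have hd0i : ((pvPairs (pvCeilA w cc) (pvCeilA h cc)).foldl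
          (fun s p => s.insert (pvKey (pvCeilA w cc) p) ([] : List Int)) PySem.Dict.empty).items
        = (pvPairs (pvCeilA w cc) (pvCeilA h cc)).map
            (fun p => (pvKey (pvCeilA w cc) p, ([] : List Int))) := by
      rw [PySem.Dict.items_foldl_insert_fresh _ (pvKey (pvCeilA w cc)) (fun _ => ([] : List Int)) _
        (fun a _ => by simp) (pvNodupKeys _ _)]
      rfl
    set d0 := (pvPairs (pvCeilA w cc) (pvCeilA h cc)).foldl
        (fun s p => s.insert (pvKey (pvCeilA w cc) p) ([] : List Int)) PySem.Dict.empty with hd0def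
    have hd0k : d0.keys = (pvPairs (pvCeilA w cc) (pvCeilA h cc)).map (pvKey (pvCeilA w cc)) := by
      simp only [PySem.Dict.keys, hd0i, List.map_map]
      rfl
    have hkeysF : ((pvPairs h w).foldl (pvDStep (pvCeilA w cc) w cc) d0).keys = d0.keys := by
      show ((pvPairs h w).foldl (fun d p => d.modify
          ((PySem.Int.floordiv p.1 cc) * (pvCeilA w cc) + PySem.Int.floordiv p.2 cc) []
          (fun l => l ++ [p.1 * w + p.2])) d0).keys = d0.keys
      rw [PySem.Dict.keys_foldl_modify_key (pvPairs h w)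
        (fun p : Int × Int => (PySem.Int.floordiv p.1 cc) * (pvCeilA w cc) + PySem.Int.floordiv p.2 cc)
        [] (fun _ p => fun l => l ++ [p.1 * w + p.2]) d0]
      apply pvSetUpdate_self
      intro x hx
      rw [List.mem_map] at hx
      obtain ⟨p, hp, rfl⟩ := hx
      rw [pvMem_pairs] at hp
      have hx1 := pvDiv_bounds (w := w) hccp hp.2.1 hp.2.2
      have hy1 := pvDiv_bounds (w := h) hccp hp.1.1 hp.1.2
      rw [hd0k, List.mem_map]
      exact ⟨(PySem.Int.floordiv p.2 cc, PySem.Int.floordiv p.1 cc),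
        pvMem_pairs.mpr ⟨⟨hx1.1, hx1.2⟩, ⟨hy1.1, hy1.2⟩⟩, rfl⟩
    have hnodupF : ((pvPairs h w).foldl (pvDStep (pvCeilA w cc) w cc) d0).keys.Nodup := by
      rw [hkeysF, hd0k]; exact pvNodupKeys _ _
    rw [PySem.Dict.items_eq_map_keys _ hnodupF [], hkeysF, hd0k, List.map_map]
    apply List.map_congr_left
    intro q hq
    have hq' := hq
    rw [pvMem_pairs] at hq'
    have hfoldmap : (pvPairs h w).foldl (pvDStep (pvCeilA w cc) w cc) d0
        = ((pvPairs h w).map (fun p =>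
            ((PySem.Int.floordiv p.1 cc) * (pvCeilA w cc) + PySem.Int.floordiv p.2 cc,
             p.1 * w + p.2))).foldl
            (fun d pr => d.modify pr.1 [] (fun l => l ++ [pr.2])) d0 := by
      rw [List.foldl_map]
      rfl
    simp only [Function.comp_apply]
    rw [hfoldmap, PySem.Dict.getD_foldl_modify_append]
    have hget0 : d0.getD (pvKey (pvCeilA w cc) q) [] = [] := by
      refine PySem.Dict.getD_of_mem_items d0 ?_ (by rw [hd0k]; exact pvNodupKeys _ _) []
      rw [hd0i]
      exact List.mem_map_of_mem hq
    rw [hget0, List.nil_append, List.filter_map, List.map_map]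
    refine congrArg (Prod.mk _) ?_
    have hfc : ∀ p ∈ pvPairs h w,
        (((fun p : Int × Int => p.1 == pvKey (pvCeilA w cc) q) ∘ fun p : Int × Int =>
          (PySem.Int.floordiv p.1 cc * pvCeilA w cc + PySem.Int.floordiv p.2 cc, p.1 * w + p.2)) p)
        = (decide (PySem.Int.floordiv p.1 cc = q.2) && decide (PySem.Int.floordiv p.2 cc = q.1)) := by
      intro p hp
      rw [pvMem_pairs] at hp
      have hx1 := pvDiv_bounds (w := w) hccp hp.2.1 hp.2.2
      simp only [Function.comp_apply, pvKey]
      by_cases e : PySem.Int.floordiv p.1 cc * pvCeilA w cc + PySem.Int.floordiv p.2 cc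
          = q.2 * pvCeilA w cc + q.1
      · have hcmp := (pvKeyInj hx1.1 hx1.2 hq'.1.1 hq'.1.2).mp e
        simp [hcmp.1, hcmp.2]
      · have hne : ¬(PySem.Int.floordiv p.1 cc = q.2 ∧ PySem.Int.floordiv p.2 cc = q.1) := by
          rintro ⟨a, b⟩; exact e (by rw [a, b])
        rcases not_and_or.mp hne with hne | hne <;> simp [e, hne]
    rw [List.filter_congr hfc]
    rw [← pvGridFilter (w := w) (h := h) (i := q.1) (j := q.2) hccp hq'.1.1 hq'.2.1]
    apply List.map_congr_left
    intro p _
    rfl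
  have hcm : reshape_to_2d ((pvPairs h w).foldl (pvCmStep m w cc iv)
        ((PySem.List.pyRange 0 (pvCeilA w cc) 1).map (fun _ =>
          (PySem.List.pyRange 0 (pvCeilA h cc) 1).map (fun _ => PySem.List.pyRepeat [0] iv))))
      = (pvPairs (pvCeilA w cc) (pvCeilA h cc)).map
          (fun p => pvCellVec m w cc h iv p.1 p.2) := by
    have hcanon : ∀ acc, ∀ p ∈ pvPairs h w, pvCmStep m w cc iv acc p
        = acc.modify (PySem.Int.floordiv p.2 cc).toNat (fun a =>
            a.modify (PySem.Int.floordiv p.1 cc).toNat (fun b =>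
              (PySem.List.pyRange 0 iv 1).foldl (fun b k =>
                b.modify k.toNat (fun z =>
                  z + (PySem.List.pyGet? ((PySem.List.pyGet? m (p.1 * w + p.2)).getD []) k).getD 0)) b)) := by
      intro acc p _
      simp only [pvCmStep, pvFoldModifySame]
      rfl
    rw [PySem.List.foldl_congr_mem _ _ _ _ hcanon]
    unfold reshape_to_2d
    dsimp only
    set CF := (pvPairs h w).foldl (fun acc x =>
        acc.modify (PySem.Int.floordiv x.2 cc).toNat (fun a =>
          a.modify (PySem.Int.floordiv x.1 cc).toNat (fun b =>
            (PySem.List.pyRange 0 iv 1).foldl (fun b k =>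
              b.modify k.toNat (fun z =>
                z + (PySem.List.pyGet? ((PySem.List.pyGet? m (x.1 * w + x.2)).getD []) k).getD 0)) b)))
      ((PySem.List.pyRange 0 (pvCeilA w cc) 1).map (fun _ =>
        (PySem.List.pyRange 0 (pvCeilA h cc) 1).map (fun _ => PySem.List.pyRepeat [0] iv))) with hCF
    have hlen : CF.length = (pvCeilA w cc).toNat := by
      rw [hCF, pvFoldlModifyLength, List.length_map, PySem.List.length_pyRange_one]
      omega
    have hrow0len : ((PySem.List.pyGet? CF 0).getD []).length = (pvCeilA h cc).toNat := by
      have h0 : PySem.List.pyGet? CF (0 : Int) = CF[0]? := PySem.List.pyGet?_natCast CF 0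
      rw [h0, hCF, pvFoldlModifyGet, pvGetMapRange, if_pos (by omega : ((0 : Nat) : Int) < pvCeilA w cc)]
      simp only [Option.map_some, Option.getD_some]
      rw [pvFoldlModifyLength, List.length_map, PySem.List.length_pyRange_one]
      omega
    rw [hlen, hrow0len, Int.toNat_of_nonneg (by omega : (0:Int) ≤ pvCeilA w cc),
      Int.toNat_of_nonneg (by omega : (0:Int) ≤ pvCeilA h cc)]
    rw [pvRangeMulMap (fun i j => (PySem.List.pyGet? ((PySem.List.pyGet? CF i).getD []) j).getD [])
      (pvCeilA w cc) (pvCeilA h cc) (by omega) (by omega)]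
    apply List.map_congr_left
    rintro ⟨qi, qj⟩ hq
    rw [pvMem_pairs] at hq
    dsimp only at hq ⊢
    obtain ⟨u, rfl⟩ : ∃ u : Nat, qi = (u : Int) := ⟨qi.toNat, by omega⟩
    obtain ⟨v, rfl⟩ : ∃ v : Nat, qj = (v : Int) := ⟨qj.toNat, by omega⟩
    rw [PySem.List.pyGet?_natCast, PySem.List.pyGet?_natCast, hCF, pvFoldlModifyGet,
      pvGetMapRange, if_pos hq.1.2]
    simp only [Option.map_some, Option.getD_some]
    rw [pvFoldlModifyGet, pvGetMapRange, if_pos hq.2.2]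
    simp only [Option.map_some, Option.getD_some]
    apply List.ext_getElem?
    intro t
    rw [pvLFold, PySem.List.pyRepeat_singleton, List.getElem?_replicate, pvCellVec, pvGetMapRange]
    by_cases ht : (t : Int) < iv
    · rw [if_pos (by omega : t < iv.toNat), if_pos ht]
      simp only [Option.map_some]
      congr 1
      simp only [ht, if_true, zero_add]
      rw [List.filter_filter]
      have hfc2 : ∀ p ∈ pvPairs h w,
          (((PySem.Int.floordiv p.1 cc).toNat == v) && ((PySem.Int.floordiv p.2 cc).toNat == u))
          = (decide (PySem.Int.floordiv p.1 cc = (v : Int)) &&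
             decide (PySem.Int.floordiv p.2 cc = (u : Int))) := by
        intro p hp
        rw [pvMem_pairs] at hp
        have hb1 := pvDiv_bounds (w := h) hccp hp.1.1 hp.1.2
        have hb2 := pvDiv_bounds (w := w) hccp hp.2.1 hp.2.2
        by_cases e1 : PySem.Int.floordiv p.1 cc = (v : Int) <;>
          by_cases e2 : PySem.Int.floordiv p.2 cc = (u : Int)
        · simp [e1, e2]
        · have hne2 : (PySem.Int.floordiv p.2 cc).toNat ≠ u := by omega
          simp [e1, e2, hne2]
        · have hne1 : (PySem.Int.floordiv p.1 cc).toNat ≠ v := by omega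
          simp [e1, e2, hne1]
        · have hne1 : (PySem.Int.floordiv p.1 cc).toNat ≠ v := by omega
          simp [e1, e2, hne1]
      rw [List.filter_congr hfc2,
        ← pvGridFilter (w := w) (h := h) (i := (u : Int)) (j := (v : Int)) hccp
          (by omega) (by omega),
        List.map_map]
      apply congrArg List.sum
      apply List.map_congr_left
      intro p _
      rfl
    · rw [if_neg (by omega : ¬ t < iv.toNat), if_neg ht]
      rfl
  rw [hcm, hdict]
  rfl

-- ===== VERDICT (by name: the statement is the Claim_ definition above) =====
theorem coarsen_spec : Claim_equal_coarsen := by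
  intro m w h iv cc _hdom hpre
  obtain ⟨hw, hh, hcc, -⟩ := hpre
  show coarsen m w h iv cc = coarsen_alt m w h iv cc
  rw [pvA_eq m w h iv cc hw hh hcc, pvB_eq m w h iv cc hw hh hcc]
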